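-- pv_equiv track=rewrite | github.com/posl/comment_recommendation | script/mod_gen/2_time/zh/130_B/6.py | count_bounce_times
-- ===== SOURCE A (Python) =====
-- def count_bounce_times(N, X, L):
--     D = [0] * (N + 1)
--     D[0] = 0
--     for i in range(1, N + 1):
--         D[i] = D[i - 1] + L[i - 1]
--     count = 0
--     for d in D:
--         if d <= X:
--             count += 1
--     return count
-- ===== SOURCE B (Python) =====
-- def count_bounce_times(N, X, L):
--     count = 1 if 0 <= X else 0
--     total = 0
--     for v in L[:N]:
--         total += v
--         if total <= X:
--             count += 1
--     return count
-- ===== Notes on version B (the rewrite author's own statement) =====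
-- stated objective: simpler
-- what changed: Drops the O(N) prefix-sum array and the second counting pass: a single pass over L[:N] maintains one scalar running total and a counter (seeded with 1 if 0 <= X for the implicit leading prefix sum 0).
import Mathlib
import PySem

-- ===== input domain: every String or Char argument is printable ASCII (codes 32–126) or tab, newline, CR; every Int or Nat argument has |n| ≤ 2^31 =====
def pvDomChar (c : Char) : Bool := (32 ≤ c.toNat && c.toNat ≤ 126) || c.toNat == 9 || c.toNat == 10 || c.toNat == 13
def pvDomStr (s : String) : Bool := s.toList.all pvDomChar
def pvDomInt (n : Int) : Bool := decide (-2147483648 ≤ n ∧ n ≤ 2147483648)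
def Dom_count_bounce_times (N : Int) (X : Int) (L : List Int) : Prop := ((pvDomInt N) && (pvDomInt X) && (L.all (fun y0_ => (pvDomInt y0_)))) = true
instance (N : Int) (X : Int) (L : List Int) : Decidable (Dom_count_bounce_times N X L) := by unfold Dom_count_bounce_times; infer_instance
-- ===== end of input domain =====

-- B replaces A's prefix-sum array and second counting pass by one pass with a scalar
-- running total (objective: simpler; return-value equivalence proved on Pre_ below).

-- ===== PORT A =====
def count_bounce_times (N : Int) (X : Int) (L : List Int) : Int :=
  let D0 : List Int := List.replicate (N + 1).toNat 0
  let D1 : List Int := D0.set 0 0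
  let D : List Int := (PySem.List.pyRange 1 (N + 1) 1).foldl
      (fun D i => D.set i.toNat (PySem.List.pyGetD D (i - 1) 0 + PySem.List.pyGetD L (i - 1) 0)) D1
  D.foldl (fun count d => if d ≤ X then count + 1 else count) 0

-- ===== PORT B =====
def count_bounce_times_alt (N : Int) (X : Int) (L : List Int) : Int :=
  let c0 : Int := if (0 : Int) ≤ X then 1 else 0
  let r : Int × Int := (PySem.List.slice L none (some N)).foldl
      (fun tc v =>
        let total := tc.1 + v
        (total, if total ≤ X then tc.2 + 1 else tc.2)) (0, c0)
  r.2

-- ===== PRECONDITION & SPEC =====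
-- Pre_ excludes exactly the inputs where A raises IndexError: N < 0 (D[0]=0 on a too-short list)
-- or N > len(L) (L[i-1] out of range).
def Pre_count_bounce_times (N : Int) (X : Int) (L : List Int) : Prop :=
  0 ≤ N ∧ N ≤ L.length
instance (N : Int) (X : Int) (L : List Int) : Decidable (Pre_count_bounce_times N X L) := by
  unfold Pre_count_bounce_times; infer_instance
def pvWitness_count_bounce_times : Int × Int × List Int := (2, 1, [1, 2])

def Spec_count_bounce_times (N : Int) (X : Int) (L : List Int) (out : Int) : Prop :=
  out = count_bounce_times_alt N X L
instance (N : Int) (X : Int) (L : List Int) (out : Int) : Decidable (Spec_count_bounce_times N X L out) := by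
  unfold Spec_count_bounce_times; infer_instance

-- ===== CLAIM (what is proved, stated in full; the proofs are below) =====
def Claim_equal_count_bounce_times : Prop := ∀ (N : Int) (X : Int) (L : List Int), Dom_count_bounce_times N X L → Pre_count_bounce_times N X L → Spec_count_bounce_times N X L (count_bounce_times N X L)

-- ===== LEMMAS AND PROOFS =====

/-- The list of prefix sums of `xs` starting at `s` (length `xs.length + 1`, head `s`). -/
def prefs : Int → List Int → List Int
  | s, [] => [s]
  | s, x :: xs => s :: prefs (s + x) xs

theorem length_prefs (s : Int) (xs : List Int) : (prefs s xs).length = xs.length + 1 := by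
  induction xs generalizing s with
  | nil => simp [prefs]
  | cons x xs ih => simp [prefs, ih]

theorem prefs_cons_tail (s : Int) (xs : List Int) : prefs s xs = s :: (prefs s xs).tail := by
  cases xs <;> simp [prefs]

theorem prefs_append_singleton (s : Int) (xs : List Int) (x : Int) :
    prefs s (xs ++ [x]) = prefs s xs ++ [s + xs.sum + x] := by
  induction xs generalizing s with
  | nil => simp [prefs]
  | cons y ys ih => simp [prefs, ih, add_assoc]

theorem prefs_getD_last (s : Int) (xs : List Int) :
    (prefs s xs).getD xs.length 0 = s + xs.sum := by
  induction xs generalizing s with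
  | nil => simp [prefs]
  | cons x ys ih =>
      show (s :: prefs (s + x) ys).getD (ys.length + 1) 0 = _
      rw [List.getD_cons_succ, ih]
      simp [add_assoc]

theorem count_fold (X : Int) (ds : List Int) (c : Int) :
    ds.foldl (fun count d => if d ≤ X then count + 1 else count) c
      = c + (ds.countP (fun d => decide (d ≤ X)) : Int) := by
  induction ds generalizing c with
  | nil => simp
  | cons d ds ih =>
      simp only [List.foldl_cons, List.countP_cons, ih]
      by_cases h : d ≤ X <;> simp [h] <;> ring

theorem b_fold (X : Int) (xs : List Int) (s c : Int) :
    (xs.foldl (fun tc v =>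
        let total := tc.1 + v
        (total, if total ≤ X then tc.2 + 1 else tc.2)) (s, c)).2
      = c + ((prefs s xs).tail.countP (fun d => decide (d ≤ X)) : Int) := by
  induction xs generalizing s c with
  | nil => simp [prefs]
  | cons x xs ih =>
      simp only [List.foldl_cons, prefs, List.tail_cons, ih]
      rw [prefs_cons_tail (s + x) xs, List.countP_cons]
      simp only [List.head_cons, decide_eq_true_eq]
      split_ifs with h <;> simp [h] <;> omega

theorem loopA (L : List Int) (n : Nat) (hn : n ≤ L.length) (m : Nat) :
    ∀ k : Nat, k + m = n →
    (PySem.List.pyRange ((k : Int) + 1) ((n : Int) + 1) 1).foldl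
      (fun D i => D.set i.toNat (PySem.List.pyGetD D (i - 1) 0 + PySem.List.pyGetD L (i - 1) 0))
      (prefs 0 (L.take k) ++ List.replicate (n - k) 0)
    = prefs 0 (L.take n) := by
  induction m with
  | zero =>
      intro k hk
      subst hk
      simp [PySem.List.pyRange_one_eq_nil]
  | succ m ih =>
      intro k hk
      have hkn : k < n := by omega
      have hkL : k < L.length := by omega
      have htk : (L.take k).length = k := by simp; omega
      have hlen : (prefs 0 (L.take k)).length = k + 1 := by rw [length_prefs, htk]
      rw [PySem.List.pyRange_one_cons (by push_cast; omega)]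
      simp only [List.foldl_cons]
      have h1 : ((k : Int) + 1 - 1) = ((k : Nat) : Int) := by ring
      have h2 : ((k : Int) + 1).toNat = k + 1 := by omega
      have hset :
          (prefs 0 (L.take k) ++ List.replicate (n - k) 0).set ((k : Int) + 1).toNat
              (PySem.List.pyGetD (prefs 0 (L.take k) ++ List.replicate (n - k) 0) ((k : Int) + 1 - 1) 0
                + PySem.List.pyGetD L ((k : Int) + 1 - 1) 0)
            = prefs 0 (L.take (k + 1)) ++ List.replicate (n - (k + 1)) 0 := by
        rw [h1, PySem.List.pyGetD_natCast, PySem.List.pyGetD_natCast, h2]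
        have hD : (prefs 0 (L.take k) ++ List.replicate (n - k) 0).getD k 0
            = (L.take k).sum := by
          rw [List.getD_append _ _ _ _ (by omega)]
          have := prefs_getD_last 0 (L.take k)
          rw [htk] at this
          rw [this, zero_add]
        have hL : L.getD k 0 = L[k] := List.getD_eq_getElem L 0 hkL
        rw [hD, hL, List.set_append_right _ _ (by omega), hlen]
        have hrep : n - k = (n - (k + 1)) + 1 := by omega
        rw [hrep]
        simp only [Nat.sub_self, List.replicate_succ, List.set_cons_zero]
        rw [List.take_succ_eq_append_getElem hkL, prefs_append_singleton, zero_add]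
        simp
      rw [hset]
      have h3 : ((k : Int) + 1 + 1) = (((k + 1 : Nat)) : Int) + 1 := by push_cast; ring
      rw [h3]
      exact ih (k + 1) (by omega)

-- ===== VERDICT (by name: the statement is the Claim_ definition above) =====
theorem count_bounce_times_spec : Claim_equal_count_bounce_times := by
  intro N X L _ hp
  rcases hp with ⟨h0, h1⟩
  have hN : N = ((N.toNat : Nat) : Int) := (Int.toNat_of_nonneg h0).symm
  set n := N.toNat with hn
  have hnL : n ≤ L.length := by omega
  simp only [Spec_count_bounce_times, count_bounce_times, count_bounce_times_alt]
  rw [hN]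
  have hD0 : (((n : Nat) : Int) + 1).toNat = n + 1 := by omega
  have hrep : (List.replicate (n + 1) (0 : Int)).set 0 0
      = prefs 0 (L.take 0) ++ List.replicate (n - 0) 0 := by
    simp [List.replicate_succ, prefs]
  have hloop := loopA L n hnL n 0 (by omega)
  rw [hD0, hrep]
  rw [show PySem.List.pyRange 1 ((n : Int) + 1) 1
        = PySem.List.pyRange (((0 : Nat) : Int) + 1) ((n : Int) + 1) 1 by norm_num]
  rw [hloop, count_fold, b_fold, PySem.List.slice_to_natCast]
  rw [prefs_cons_tail 0 (L.take n)]
  simp only [List.tail_cons, List.countP_cons, decide_eq_true_eq]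
  by_cases h : (0 : Int) ≤ X <;> simp [h] <;> push_cast <;> ring
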